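-- pv_equiv track=rewrite | github.com/Kaleswarydon/AdventOfCode | Day02/puzzle02.py | check_game_batch_validity
-- ===== SOURCE A (Python) =====
-- def get_draws(g: str):
--     res = {'game_id': 0, 'draws': []}
--     tmp = [x.strip() for x in g.split(':')]
--     res.update({'game_id': int(tmp[0].split(' ')[1])})
--     draws = [x.strip() for x in tmp[1].split(';')]
--     for d in draws:
--         tmp_draw_list = res.get('draws')
--         colors = [x.strip() for x in d.split(',')]
--         tmp_draw = {}
--         for c in colors:
--             tmp2 = c.split(' ')
--             color = tmp2[1]
--             amount = tmp2[0]
--             tmp_draw.update({color: int(amount)})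
--             tmp_draw_list.append(tmp_draw)
--         res.update({'draws': tmp_draw_list})
--     return res
--
-- def is_valid_game(game: dict, condition: dict):
--     min_config = {'red': 0, 'green': 0, 'blue': 0}
--     for d in game.get('draws'):
--         for c in d.keys():
--             if min_config.get(c) < d.get(c):
--                 min_config.update({c: d.get(c)})
--     for c in min_config.keys():
--         if condition.get(c) < min_config.get(c):
--             return False, min_config
--     return True, min_config
--
-- def check_game_batch_validity(games: list, condition: dict):
--     res_valid = {}
--     res_invalid = {}
--     for game in games:
--         draws = get_draws(game)
--         is_valid, min_config = is_valid_game(draws, condition)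
--         if is_valid:
--             res_valid.update({draws.get('game_id'): min_config})
--         else:
--             res_invalid.update({draws.get('game_id'): min_config})
--     return res_valid, res_invalid
-- ===== SOURCE B (Python) =====
-- def check_game_batch_validity(games: list, condition: dict):
--     res_valid, res_invalid = {}, {}
--     for game in games:
--         head, body = game.split(':')[:2]
--         gid = int(head.strip().split(' ')[1])
--         maxd = {'red': 0, 'green': 0, 'blue': 0}
--         for part in body.strip().split(';'):
--             for entry in part.strip().split(','):
--                 tok = entry.strip().split(' ')
--                 n, color = int(tok[0]), tok[1]
--                 if n > maxd[color]:
--                     maxd[color] = n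
--         if all(condition[c] >= maxd[c] for c in ('red', 'green', 'blue')):
--             res_valid[gid] = maxd
--         else:
--             res_invalid[gid] = maxd
--     return res_valid, res_invalid
-- ===== Notes on version B (the rewrite author's own statement) =====
-- stated objective: simpler
-- what changed: B folds A's three functions into one pass per game that keeps a single running-max dict per game, building neither the per-draw dict list (with its aliased repeated appends) nor a separate validity routine.
import Mathlib
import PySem

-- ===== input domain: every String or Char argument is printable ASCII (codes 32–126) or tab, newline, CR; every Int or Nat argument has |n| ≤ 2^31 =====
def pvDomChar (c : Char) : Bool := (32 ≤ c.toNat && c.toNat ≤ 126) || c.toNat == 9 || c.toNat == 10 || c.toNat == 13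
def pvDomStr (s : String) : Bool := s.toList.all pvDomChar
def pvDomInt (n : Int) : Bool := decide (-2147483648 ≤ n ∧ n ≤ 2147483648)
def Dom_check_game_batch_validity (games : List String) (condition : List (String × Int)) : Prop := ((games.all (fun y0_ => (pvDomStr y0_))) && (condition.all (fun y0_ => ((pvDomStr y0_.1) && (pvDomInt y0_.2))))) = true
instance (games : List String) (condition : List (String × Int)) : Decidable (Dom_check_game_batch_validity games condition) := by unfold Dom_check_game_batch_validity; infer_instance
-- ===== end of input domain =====

-- B collapses A's three functions into one pass that keeps a running max dict per game,
-- building no per-draw dict list (objective: simpler).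

-- Python dict lookup condition.get(c) on the association list (first match; the None
-- case — missing key — is excluded by Pre_ and ported as default 0)
def condGetD (condition : List (String × Int)) (c : String) : Int :=
  ((condition.find? (fun p => p.1 == c)).map Prod.snd).getD 0

-- ===== PORT A =====
-- get_draws' inner color loop: tmp_draw.update({color: int(amount)})
def aColorStep (td : PySem.Dict String Int) (c : List Char) : PySem.Dict String Int :=
  let tmp2 := PySem.Chars.splitOn c [' ']
  let color := String.ofList (tmp2.getD 1 [])           -- tmp2[1]; IndexError excluded by Pre_
  let amount := tmp2.getD 0 []
  td.insert color ((PySem.Int.ofChars? amount).getD 0)  -- int(amount); ValueError excluded by Pre_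

def aGetDraws (g : String) : Int × List (PySem.Dict String Int) :=
  let tmp := (PySem.Chars.splitOn g.toList [':']).map PySem.Chars.strip
  let gameId := (PySem.Int.ofChars? ((PySem.Chars.splitOn (tmp.getD 0 []) [' ']).getD 1 [])).getD 0
  let draws := (PySem.Chars.splitOn (tmp.getD 1 []) [';']).map PySem.Chars.strip
  let dlist := draws.foldl (fun lst d =>
      let colors := (PySem.Chars.splitOn d [',']).map PySem.Chars.strip
      let td := colors.foldl aColorStep PySem.Dict.empty
      -- Python appends the SAME dict object once per color and keeps mutating it;
      -- after the loop the list holds the draw's final dict colors.length times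
      lst ++ List.replicate colors.length td) []
  (gameId, dlist)

-- is_valid_game's merge loop: if min_config.get(c) < d.get(c) (None cases excluded by Pre_)
def aMergeDraw (mc : PySem.Dict String Int) (d : PySem.Dict String Int) : PySem.Dict String Int :=
  d.keys.foldl (fun mc c => if mc.getD c 0 < d.getD c 0 then mc.insert c (d.getD c 0) else mc) mc

def aIsValid (draws : List (PySem.Dict String Int)) (condition : List (String × Int)) :
    Bool × PySem.Dict String Int :=
  let minConfig := draws.foldl aMergeDraw (PySem.Dict.mk [("red", 0), ("green", 0), ("blue", 0)])
  -- the early-return loop over min_config.keys(); min_config is returned unchanged either way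
  if minConfig.keys.any (fun c => condGetD condition c < minConfig.getD c 0) then (false, minConfig)
  else (true, minConfig)

def check_game_batch_validity (games : List String) (condition : List (String × Int)) : (List (Int × List (String × Int))) × (List (Int × List (String × Int))) :=
  let res := games.foldl (fun (acc : PySem.Dict Int (List (String × Int)) × PySem.Dict Int (List (String × Int))) game =>
      let gd := aGetDraws game
      let iv := aIsValid gd.2 condition
      if iv.1 then (acc.1.insert gd.1 iv.2.items, acc.2) else (acc.1, acc.2.insert gd.1 iv.2.items))
    (PySem.Dict.empty, PySem.Dict.empty)
  (res.1.items, res.2.items)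

-- ===== PORT B =====
-- B's inner loop: tok = entry.strip().split(' '); if n > maxd[color]: maxd[color] = n
def bEntryStep (md : PySem.Dict String Int) (entry : List Char) : PySem.Dict String Int :=
  let tok := PySem.Chars.splitOn (PySem.Chars.strip entry) [' ']
  let n := (PySem.Int.ofChars? (tok.getD 0 [])).getD 0   -- int(tok[0]); errors excluded by Pre_
  let color := String.ofList (tok.getD 1 [])
  if md.getD color 0 < n then md.insert color n else md  -- maxd[color]; KeyError excluded by Pre_

def bGame (game : String) : Int × PySem.Dict String Int :=
  let parts := PySem.Chars.splitOn game.toList [':']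
  let head := parts.getD 0 []
  let body := parts.getD 1 []
  let gameId := (PySem.Int.ofChars? ((PySem.Chars.splitOn (PySem.Chars.strip head) [' ']).getD 1 [])).getD 0
  let maxd := (PySem.Chars.splitOn (PySem.Chars.strip body) [';']).foldl
      (fun md part => (PySem.Chars.splitOn (PySem.Chars.strip part) [',']).foldl bEntryStep md)
      (PySem.Dict.mk [("red", 0), ("green", 0), ("blue", 0)])
  (gameId, maxd)

def check_game_batch_validity_alt (games : List String) (condition : List (String × Int)) : (List (Int × List (String × Int))) × (List (Int × List (String × Int))) :=
  let res := games.foldl (fun (acc : PySem.Dict Int (List (String × Int)) × PySem.Dict Int (List (String × Int))) game =>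
      let gm := bGame game
      if (["red", "green", "blue"] : List String).all (fun c => gm.2.getD c 0 ≤ condGetD condition c)
      then (acc.1.insert gm.1 gm.2.items, acc.2) else (acc.1, acc.2.insert gm.1 gm.2.items))
    (PySem.Dict.empty, PySem.Dict.empty)
  (res.1.items, res.2.items)

-- ===== PRECONDITION & SPEC =====
-- the color name of one "<amount> <color>" entry
def entryColor (e : List Char) : String :=
  String.ofList ((PySem.Chars.splitOn (PySem.Chars.strip e) [' ']).getD 1 [])

-- one "<amount> <color>" entry is well formed: ≥ 2 space-tokens, int amount, known color
def goodEntry (e : List Char) : Bool :=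
  let tok := PySem.Chars.splitOn (PySem.Chars.strip e) [' ']
  decide (2 ≤ tok.length) && (PySem.Int.ofChars? (tok.getD 0 [])).isSome &&
    (["red", "green", "blue"] : List String).contains (String.ofList (tok.getD 1 []))

-- one draw: every entry well formed and no color repeated inside the draw
def goodDraw (part : List Char) : Bool :=
  let entries := PySem.Chars.splitOn (PySem.Chars.strip part) [',']
  entries.all goodEntry && decide ((entries.map entryColor).Nodup)

def goodGame (g : String) : Bool :=
  let parts := PySem.Chars.splitOn g.toList [':']
  let htok := PySem.Chars.splitOn (PySem.Chars.strip (parts.getD 0 [])) [' ']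
  decide (2 ≤ parts.length) && decide (2 ≤ htok.length) &&
    (PySem.Int.ofChars? (htok.getD 1 [])).isSome &&
    (PySem.Chars.splitOn (PySem.Chars.strip (parts.getD 1 [])) [';']).all goodDraw

-- Pre_ excludes (a) malformed game strings, on which A raises (IndexError/ValueError/TypeError);
-- (b) games in which one draw repeats a color — A's dict overwrite keeps the draw's LAST amount
-- while B's running max keeps the largest, both defensible duplicate-key behaviours; and
-- (c) non-empty batches whose condition dict lacks one of red/green/blue, where A raises
-- TypeError unless an earlier color's check already failed.
def Pre_check_game_batch_validity (games : List String) (condition : List (String × Int)) : Prop :=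
  games.all goodGame = true ∧
  (games = [] ∨ ("red" ∈ condition.map Prod.fst ∧ "green" ∈ condition.map Prod.fst ∧
                 "blue" ∈ condition.map Prod.fst))
instance (games : List String) (condition : List (String × Int)) : Decidable (Pre_check_game_batch_validity games condition) := by unfold Pre_check_game_batch_validity; infer_instance

def pvWitness_check_game_batch_validity : List String × (List (String × Int)) :=
  (["Game 1: 3 red, 4 blue; 5 green", "Game 12: 9 blue"],
   [("red", 4), ("green", 5), ("blue", 4)])

def Spec_check_game_batch_validity (games : List String) (condition : List (String × Int)) (out : (List (Int × List (String × Int))) × (List (Int × List (String × Int)))) : Prop := out = check_game_batch_validity_alt games condition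
instance (games : List String) (condition : List (String × Int)) (out : (List (Int × List (String × Int))) × (List (Int × List (String × Int)))) : Decidable (Spec_check_game_batch_validity games condition out) := by unfold Spec_check_game_batch_validity; infer_instance

-- ===== CLAIM (what is proved, stated in full; the proofs are below) =====
def Claim_equal_check_game_batch_validity : Prop := ∀ (games : List String) (condition : List (String × Int)), Dom_check_game_batch_validity games condition → Pre_check_game_batch_validity games condition → Spec_check_game_batch_validity games condition (check_game_batch_validity games condition)

-- ===== LEMMAS AND PROOFS =====

theorem splitOn_go_ne_nil (sep : List Char) (fuel : Nat) : ∀ (l cur : List Char) (accs : List (List Char)), PySem.Chars.splitOn.go sep fuel l cur accs ≠ [] := by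
  induction fuel with
  | zero => intro l cur accs; simp [PySem.Chars.splitOn.go]
  | succ n ih =>
    intro l cur accs
    cases l with
    | nil => simp [PySem.Chars.splitOn.go]
    | cons c rest =>
      rw [PySem.Chars.splitOn.go]
      split
      · exact ih _ _ _
      · exact ih _ _ _

theorem splitOn_ne_nil (s sep : List Char) : PySem.Chars.splitOn s sep ≠ [] :=
  splitOn_go_ne_nil sep _ s [] []

theorem map_strip_getD_zero (l : List (List Char)) (h : l ≠ []) :
    (l.map PySem.Chars.strip).getD 0 [] = PySem.Chars.strip (l.getD 0 []) := by
  match l with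
  | [] => exact absurd rfl h
  | a :: t => rfl

theorem map_strip_getD_one (l : List (List Char)) (h : 2 ≤ l.length) :
    (l.map PySem.Chars.strip).getD 1 [] = PySem.Chars.strip (l.getD 1 []) := by
  match l with
  | [] => simp at h
  | [a] => simp at h
  | a :: b :: t => rfl

-- the triple abstraction: every max dict either port manipulates is this 3-entry dict
def tD (t : Int × Int × Int) : PySem.Dict String Int :=
  PySem.Dict.mk [("red", t.1), ("green", t.2.1), ("blue", t.2.2)]

def upd3 (t : Int × Int × Int) (k : String) (n : Int) : Int × Int × Int :=
  (if k = "red" ∧ t.1 < n then n else t.1,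
   if k = "green" ∧ t.2.1 < n then n else t.2.1,
   if k = "blue" ∧ t.2.2 < n then n else t.2.2)

def run3 (t : Int × Int × Int) (ps : List (String × Int)) : Int × Int × Int :=
  ps.foldl (fun t p => upd3 t p.1 p.2) t

def bump (k : String) (v : Int) (p : String × Int) : Int :=
  if p.1 = k ∧ v < p.2 then p.2 else v

theorem getD_tD (t : Int × Int × Int) (k : String) :
    (tD t).getD k 0 = if k = "red" then t.1 else if k = "green" then t.2.1 else
      if k = "blue" then t.2.2 else 0 := by
  simp only [tD, PySem.Dict.getD_eq_get?_getD]
  rw [PySem.Dict.get?_mk_cons, PySem.Dict.get?_mk_cons, PySem.Dict.get?_mk_cons]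
  simp only [beq_iff_eq]
  by_cases h1 : k = "red"
  · simp [h1]
  · have h1' : ¬ ("red" = k) := fun e => h1 e.symm
    by_cases h2 : k = "green"
    · simp [h2]
    · have h2' : ¬ ("green" = k) := fun e => h2 e.symm
      by_cases h3 : k = "blue"
      · simp [h3]
      · have h3' : ¬ ("blue" = k) := fun e => h3 e.symm
        simp [h1, h1', h2, h2', h3, h3', PySem.Dict.get?]

theorem step_tD (t : Int × Int × Int) (k : String) (n : Int)
    (hk : k ∈ (["red", "green", "blue"] : List String)) :
    (if (tD t).getD k 0 < n then (tD t).insert k n else tD t) = tD (upd3 t k n) := by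
  simp only [List.mem_cons, List.not_mem_nil, or_false] at hk
  rcases hk with rfl | rfl | rfl <;>
    · simp only [getD_tD, upd3, if_true]
      split_ifs <;>
        simp_all [tD, PySem.Dict.insert, PySem.Dict.contains, List.any]

theorem run3_components (ps : List (String × Int)) (t : Int × Int × Int) :
    run3 t ps = (ps.foldl (bump "red") t.1, ps.foldl (bump "green") t.2.1,
                 ps.foldl (bump "blue") t.2.2) := by
  induction ps generalizing t with
  | nil => simp [run3]
  | cons p rest ih =>
    simp only [run3, List.foldl_cons] at ih ⊢
    rw [ih]
    rfl

theorem le_bump (k : String) (v : Int) (p : String × Int) : v ≤ bump k v p := by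
  simp only [bump]; split_ifs with h
  · exact le_of_lt h.2
  · exact le_refl v

theorem bump_bounds (k : String) (ps : List (String × Int)) : ∀ (a : Int),
    a ≤ ps.foldl (bump k) a ∧ ∀ p ∈ ps, p.1 = k → p.2 ≤ ps.foldl (bump k) a := by
  induction ps with
  | nil => intro a; simp
  | cons q rest ih =>
    intro a
    refine ⟨le_trans (le_bump k a q) (ih (bump k a q)).1, ?_⟩
    intro p hp hk
    rcases List.mem_cons.mp hp with h | h
    · subst h
      refine le_trans ?_ (ih (bump k a p)).1
      simp only [bump, hk, true_and]
      split_ifs <;> omega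
    · exact (ih (bump k a q)).2 p h hk

theorem bump_noop (k : String) (ps : List (String × Int)) : ∀ (a : Int),
    (∀ p ∈ ps, p.1 = k → p.2 ≤ a) → ps.foldl (bump k) a = a := by
  induction ps with
  | nil => intro a _; rfl
  | cons q rest ih =>
    intro a h
    have hq : bump k a q = a := by
      simp only [bump]; split_ifs with hc
      · exact absurd (h q (by simp) hc.1) (by omega)
      · rfl
    simp only [List.foldl_cons, hq]
    exact ih a (fun p hp hk => h p (List.mem_cons_of_mem _ hp) hk)

theorem run3_idem (t : Int × Int × Int) (ps : List (String × Int)) :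
    run3 (run3 t ps) ps = run3 t ps := by
  rw [run3_components, run3_components]
  dsimp only
  refine Prod.ext ?_ (Prod.ext ?_ ?_) <;> dsimp only <;>
    exact bump_noop _ ps _ (fun p hp hk => (bump_bounds _ ps _).2 p hp hk)

-- per-entry data of B's loop
def entryVal (e : List Char) : Int :=
  (PySem.Int.ofChars? ((PySem.Chars.splitOn (PySem.Chars.strip e) [' ']).getD 0 [])).getD 0

theorem bEntryStep_tD (t : Int × Int × Int) (e : List Char) (h : goodEntry e = true) :
    bEntryStep (tD t) e = tD (upd3 t (entryColor e) (entryVal e)) := by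
  have hk : entryColor e ∈ (["red", "green", "blue"] : List String) := by
    have h2 : (["red", "green", "blue"] : List String).contains (entryColor e) = true := by
      simp only [goodEntry, Bool.and_eq_true] at h
      exact h.2
    simpa using h2
  simpa only [bEntryStep, entryColor, entryVal] using step_tD t (entryColor e) (entryVal e) hk

theorem fold_bEntryStep_tD (entries : List (List Char)) (t : Int × Int × Int)
    (h : ∀ e ∈ entries, goodEntry e = true) :
    entries.foldl bEntryStep (tD t) =
      tD (run3 t (entries.map (fun e => (entryColor e, entryVal e)))) := by
  induction entries generalizing t with
  | nil => simp [run3]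
  | cons e rest ih =>
    simp only [List.foldl_cons, List.map_cons]
    rw [bEntryStep_tD t e (h e (by simp)), ih _ (fun x hx => h x (List.mem_cons_of_mem _ hx))]
    simp [run3]

-- A's per-draw dict, and its merge into min_config, reduced to the same run3
theorem aMergeDraw_tD (entries : List (List Char)) (t : Int × Int × Int)
    (hgood : ∀ e ∈ entries, goodEntry e = true)
    (hnd : (entries.map entryColor).Nodup) :
    aMergeDraw (tD t) ((entries.map PySem.Chars.strip).foldl aColorStep PySem.Dict.empty) =
      tD (run3 t (entries.map (fun e => (entryColor e, entryVal e)))) := by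
  have hfold : (entries.map PySem.Chars.strip).foldl aColorStep PySem.Dict.empty =
      entries.foldl (fun td e => td.insert (entryColor e) (entryVal e)) PySem.Dict.empty := by
    rw [List.foldl_map]
    rfl
  have hitems : (entries.foldl (fun td e => td.insert (entryColor e) (entryVal e))
      PySem.Dict.empty).items = entries.map (fun e => (entryColor e, entryVal e)) := by
    rw [PySem.Dict.items_foldl_insert_fresh entries entryColor entryVal PySem.Dict.empty
      (fun a _ => by simp [pysem]) hnd]
    simp [PySem.Dict.empty]
  set td := (entries.map PySem.Chars.strip).foldl aColorStep PySem.Dict.empty with htd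
  have hkeys : td.keys = entries.map entryColor := by
    simp only [PySem.Dict.keys, hfold, hitems]
    simp [Function.comp]
  have hndk : td.keys.Nodup := by rw [hkeys]; exact hnd
  have hget : ∀ e ∈ entries, td.getD (entryColor e) 0 = entryVal e := by
    intro e he
    refine PySem.Dict.getD_of_mem_items td ?_ hndk 0
    rw [hfold, hitems]
    exact List.mem_map_of_mem he
  unfold aMergeDraw
  rw [hkeys, List.foldl_map]
  have hcongr : entries.foldl
      (fun mc e => if mc.getD (entryColor e) 0 < td.getD (entryColor e) 0
        then mc.insert (entryColor e) (td.getD (entryColor e) 0) else mc) (tD t) =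
    entries.foldl (fun mc e => bEntryStep mc e) (tD t) := by
    apply PySem.List.foldl_congr_mem
    intro acc e he
    rw [hget e he]
    simp only [bEntryStep, entryColor, entryVal]
  rw [hcongr]
  exact fold_bEntryStep_tD entries t hgood

theorem replicate_merge (td : PySem.Dict String Int) (u : Int × Int × Int)
    (hidem : aMergeDraw (tD u) td = tD u) :
    ∀ (k : Nat), (List.replicate k td).foldl aMergeDraw (tD u) = tD u := by
  intro k
  induction k with
  | zero => rfl
  | succ m ih => simp only [List.replicate_succ, List.foldl_cons, hidem]; exact ih

-- one draw: A's replicate-block merge equals B's direct entry fold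
theorem draw_eq (part : List Char) (t : Int × Int × Int) (h : goodDraw part = true) :
    (List.replicate (((PySem.Chars.splitOn (PySem.Chars.strip part) [',']).map PySem.Chars.strip).length)
        (((PySem.Chars.splitOn (PySem.Chars.strip part) [',']).map PySem.Chars.strip).foldl aColorStep PySem.Dict.empty)).foldl
      aMergeDraw (tD t) =
    (PySem.Chars.splitOn (PySem.Chars.strip part) [',']).foldl bEntryStep (tD t) := by
  simp only [goodDraw, Bool.and_eq_true, List.all_eq_true, decide_eq_true_eq] at h
  obtain ⟨hgood, hnd⟩ := h
  set entries := PySem.Chars.splitOn (PySem.Chars.strip part) [','] with hent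
  set ps := entries.map (fun e => (entryColor e, entryVal e)) with hps
  have hmerge : ∀ (u : Int × Int × Int),
      aMergeDraw (tD u) ((entries.map PySem.Chars.strip).foldl aColorStep PySem.Dict.empty) =
        tD (run3 u ps) := fun u => aMergeDraw_tD entries u hgood hnd
  obtain ⟨e0, rest, hcons⟩ : ∃ e0 rest, entries = e0 :: rest := by
    cases hc : entries with
    | nil => exact absurd (hent ▸ hc) (by simpa [hent] using splitOn_ne_nil (PySem.Chars.strip part) [','])
    | cons a l => exact ⟨a, l, rfl⟩
  rw [fold_bEntryStep_tD entries t hgood]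
  have hlen : (entries.map PySem.Chars.strip).length = rest.length + 1 := by
    simp [hcons]
  rw [hlen, List.replicate_succ, List.foldl_cons, hmerge t]
  exact replicate_merge _ _ (by rw [hmerge (run3 t ps), run3_idem]) rest.length

-- B's per-game fold keeps the triple-dict shape
theorem bfold_shape (ps : List (List Char)) (t : Int × Int × Int)
    (h : ∀ p ∈ ps, goodDraw p = true) :
    ∃ u, ps.foldl (fun md part => (PySem.Chars.splitOn (PySem.Chars.strip part) [',']).foldl bEntryStep md) (tD t) = tD u := by
  induction ps generalizing t with
  | nil => exact ⟨t, rfl⟩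
  | cons p rest ih =>
    simp only [List.foldl_cons]
    have hp := h p (by simp)
    simp only [goodDraw, Bool.and_eq_true, List.all_eq_true] at hp
    rw [fold_bEntryStep_tD _ t hp.1]
    exact ih _ (fun q hq => h q (List.mem_cons_of_mem _ hq))

-- A's flattened draw list, merged draw by draw, equals B's fused per-entry fold
theorem body_fold (ps : List (List Char)) (t : Int × Int × Int)
    (h : ∀ p ∈ ps, goodDraw p = true) :
    ((ps.map PySem.Chars.strip).flatMap (fun d =>
        List.replicate (((PySem.Chars.splitOn d [',']).map PySem.Chars.strip).length)
          (((PySem.Chars.splitOn d [',']).map PySem.Chars.strip).foldl aColorStep PySem.Dict.empty))).foldl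
      aMergeDraw (tD t) =
    ps.foldl (fun md part => (PySem.Chars.splitOn (PySem.Chars.strip part) [',']).foldl bEntryStep md) (tD t) := by
  induction ps generalizing t with
  | nil => rfl
  | cons p rest ih =>
    simp only [List.map_cons, List.flatMap_cons, List.foldl_append, List.foldl_cons]
    rw [draw_eq p t (h p (by simp))]
    have hp := h p (by simp)
    simp only [goodDraw, Bool.and_eq_true, List.all_eq_true] at hp
    obtain ⟨u, hu⟩ : ∃ u, (PySem.Chars.splitOn (PySem.Chars.strip p) [',']).foldl bEntryStep (tD t) = tD u :=
      ⟨_, fold_bEntryStep_tD _ t hp.1⟩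
    rw [hu]
    exact ih u (fun q hq => h q (List.mem_cons_of_mem _ hq))

-- the two per-game computations agree on a good game
theorem game_mc_eq (g : String) (h : goodGame g = true) :
    (aGetDraws g).1 = (bGame g).1 ∧
    ∃ u, (aGetDraws g).2.foldl aMergeDraw (tD (0, 0, 0)) = tD u ∧ (bGame g).2 = tD u := by
  simp only [goodGame, Bool.and_eq_true, decide_eq_true_eq, List.all_eq_true] at h
  obtain ⟨⟨⟨hp2, _⟩, _⟩, hdraws⟩ := h
  have hne : PySem.Chars.splitOn g.toList [':'] ≠ [] := splitOn_ne_nil _ _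
  have h0 := map_strip_getD_zero (PySem.Chars.splitOn g.toList [':']) hne
  have h1 := map_strip_getD_one (PySem.Chars.splitOn g.toList [':']) hp2
  obtain ⟨u, hu⟩ := bfold_shape
    (PySem.Chars.splitOn (PySem.Chars.strip ((PySem.Chars.splitOn g.toList [':']).getD 1 [])) [';'])
    (0, 0, 0) hdraws
  refine ⟨?_, u, ?_, ?_⟩
  · simp only [aGetDraws, bGame, h0]
  · simp only [aGetDraws]
    rw [h1, PySem.List.foldl_append_eq_flatMap, List.nil_append]
    exact (body_fold _ (0, 0, 0) hdraws).trans hu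
  · simp only [bGame]
    exact hu

-- A's any-over-keys invalidity test is the negation of B's all-check, on a triple dict
theorem valid_eq (condition : List (String × Int)) (u : Int × Int × Int) :
    ((tD u).keys.any (fun c => condGetD condition c < (tD u).getD c 0)) =
      !((["red", "green", "blue"] : List String).all (fun c => (tD u).getD c 0 ≤ condGetD condition c)) := by
  have hkeys : (tD u).keys = ["red", "green", "blue"] := by simp [tD, PySem.Dict.keys]
  rw [hkeys]
  simp only [List.any, List.all, Bool.not_and, Bool.or_false, Bool.and_true]
  rcases lt_or_ge (condGetD condition "red") ((tD u).getD "red" 0) with h1 | h1 <;>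
  rcases lt_or_ge (condGetD condition "green") ((tD u).getD "green" 0) with h2 | h2 <;>
  rcases lt_or_ge (condGetD condition "blue") ((tD u).getD "blue" 0) with h3 | h3 <;>
    simp [h1, h2, h3, not_lt.mpr]

-- ===== VERDICT (by name: the statement is the Claim_ definition above) =====
theorem check_game_batch_validity_spec : Claim_equal_check_game_batch_validity := by
  intro games condition _ hpre
  unfold Spec_check_game_batch_validity
  unfold check_game_batch_validity check_game_batch_validity_alt
  have hfold : games.foldl (fun (acc : PySem.Dict Int (List (String × Int)) × PySem.Dict Int (List (String × Int))) game =>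
      let gd := aGetDraws game
      let iv := aIsValid gd.2 condition
      if iv.1 then (acc.1.insert gd.1 iv.2.items, acc.2) else (acc.1, acc.2.insert gd.1 iv.2.items))
      (PySem.Dict.empty, PySem.Dict.empty) =
    games.foldl (fun (acc : PySem.Dict Int (List (String × Int)) × PySem.Dict Int (List (String × Int))) game =>
      let gm := bGame game
      if (["red", "green", "blue"] : List String).all (fun c => gm.2.getD c 0 ≤ condGetD condition c)
      then (acc.1.insert gm.1 gm.2.items, acc.2) else (acc.1, acc.2.insert gm.1 gm.2.items))
      (PySem.Dict.empty, PySem.Dict.empty) := by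
    apply PySem.List.foldl_congr_mem
    intro acc g hg
    have hgood : goodGame g = true := by
      have := hpre.1
      simp only [List.all_eq_true] at this
      exact this g hg
    obtain ⟨hid, u, hA, hB⟩ := game_mc_eq g hgood
    have hA' : (aGetDraws g).2.foldl aMergeDraw
        (PySem.Dict.mk [("red", 0), ("green", 0), ("blue", 0)]) = tD u := hA
    simp only [aIsValid, hB, hid]
    rw [hA', valid_eq condition u]
    cases hall : (["red", "green", "blue"] : List String).all
        (fun c => decide ((tD u).getD c 0 ≤ condGetD condition c)) <;> simp
  rw [hfold]
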